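-- pv_equiv track=rewrite | github.com/aerusakovich/nf_nanocirc_long_read | bin/circnick_to_bed12.py | derive_exons_from_introns
-- ===== SOURCE A (Python) =====
-- def derive_exons_from_introns(bsj_start, bsj_end, introns):
--     """
--     Derive exon coordinates by filling gaps between introns within the BSJ span.
--
--     Example:
--         bsj_start = 12432628, bsj_end = 12434051
--         introns   = [(12432779, 12433611), (12433770, 12433916)]
--         → exons: [(12432628, 12432779), (12433611, 12433770), (12433916, 12434051)]
--     """
--     exons   = []
--     current = bsj_start
--
--     for intron_start, intron_end in introns:
--         if intron_start >= bsj_end or intron_end <= bsj_start: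
--             continue
--
--         if current < intron_start:
--             exons.append((current, intron_start))
--
--         current = intron_end
--
--     if current < bsj_end:
--         exons.append((current, bsj_end))
--
--     return exons
-- ===== SOURCE B (Python) =====
-- def derive_exons_from_introns(bsj_start, bsj_end, introns):
--     # Build a flat boundary list, then pair consecutive boundaries two at a time.
--     coords = [bsj_start]
--     for intron_start, intron_end in introns:
--         if intron_start >= bsj_end or intron_end <= bsj_start:
--             continue
--         coords.append(intron_start)
--         coords.append(intron_end)
--     coords.append(bsj_end)
--
--     exons = []
--     rest = coords
--     while len(rest) >= 2:
--         a, b = rest[0], rest[1]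
--         if a < b:
--             exons.append((a, b))
--         rest = rest[2:]
--     return exons
-- ===== Notes on version B (the rewrite author's own statement) =====
-- stated objective: alternative
-- what changed: B replaces A's running-cursor state machine by building a flat boundary list (bsj_start, filtered intron boundaries, bsj_end) and then pairing consecutive boundaries two at a time with a < guard.
import Mathlib
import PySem

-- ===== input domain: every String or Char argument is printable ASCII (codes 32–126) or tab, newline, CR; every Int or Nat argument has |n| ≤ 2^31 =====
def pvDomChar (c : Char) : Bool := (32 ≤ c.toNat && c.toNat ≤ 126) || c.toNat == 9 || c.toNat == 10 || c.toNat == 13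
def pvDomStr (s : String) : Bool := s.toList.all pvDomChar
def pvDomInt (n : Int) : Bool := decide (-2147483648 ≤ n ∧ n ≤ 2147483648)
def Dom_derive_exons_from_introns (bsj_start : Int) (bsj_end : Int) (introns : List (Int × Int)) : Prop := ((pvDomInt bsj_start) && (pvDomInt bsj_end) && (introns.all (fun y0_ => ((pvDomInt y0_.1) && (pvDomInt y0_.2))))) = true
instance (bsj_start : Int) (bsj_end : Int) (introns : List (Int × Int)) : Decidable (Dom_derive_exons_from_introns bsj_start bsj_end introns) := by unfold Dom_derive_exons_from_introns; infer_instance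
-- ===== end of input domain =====

-- B replaces A's running-cursor state machine by a flat boundary list paired two at a time (objective: alternative structure, same cost).


-- ===== PORT A =====
-- literal transliteration of A: fold over introns with state (exons, current), then the trailing append
def derive_exons_from_introns (bsj_start : Int) (bsj_end : Int) (introns : List (Int × Int)) : List (Int × Int) :=
  let st := introns.foldl
    (fun (st : List (Int × Int) × Int) p =>
      if p.1 ≥ bsj_end ∨ p.2 ≤ bsj_start then st
      else ((if st.2 < p.1 then st.1 ++ [(st.2, p.1)] else st.1), p.2))
    ([], bsj_start)
  if st.2 < bsj_end then st.1 ++ [(st.2, bsj_end)] else st.1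

-- ===== PORT B =====
-- Source B's while loop consuming the boundary list two elements at a time
def pvPairTwo (coords : List Int) : List (Int × Int) :=
  match coords with
  | a :: b :: rest => if a < b then (a, b) :: pvPairTwo rest else pvPairTwo rest
  | _ => []

def derive_exons_from_introns_alt (bsj_start : Int) (bsj_end : Int) (introns : List (Int × Int)) : List (Int × Int) :=
  let coords := introns.foldl
    (fun (acc : List Int) p =>
      if p.1 ≥ bsj_end ∨ p.2 ≤ bsj_start then acc else acc ++ [p.1, p.2])
    [bsj_start]
  pvPairTwo (coords ++ [bsj_end])

-- ===== PRECONDITION & SPEC =====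
def Spec_derive_exons_from_introns (bsj_start : Int) (bsj_end : Int) (introns : List (Int × Int)) (out : List (Int × Int)) : Prop := out = derive_exons_from_introns_alt bsj_start bsj_end introns
instance (bsj_start : Int) (bsj_end : Int) (introns : List (Int × Int)) (out : List (Int × Int)) : Decidable (Spec_derive_exons_from_introns bsj_start bsj_end introns out) := by unfold Spec_derive_exons_from_introns; infer_instance

-- ===== CLAIM (what is proved, stated in full; the proofs are below) =====
def Claim_equal_derive_exons_from_introns : Prop := ∀ (bsj_start : Int) (bsj_end : Int) (introns : List (Int × Int)), Dom_derive_exons_from_introns bsj_start bsj_end introns → Spec_derive_exons_from_introns bsj_start bsj_end introns (derive_exons_from_introns bsj_start bsj_end introns)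

-- ===== LEMMAS AND PROOFS =====

-- the common "spine": exons produced from cursor c over the remaining introns
def pvGo (bs be c : Int) : List (Int × Int) → List (Int × Int)
  | [] => if c < be then [(c, be)] else []
  | p :: rest =>
      if p.1 ≥ be ∨ p.2 ≤ bs then pvGo bs be c rest
      else (if c < p.1 then [(c, p.1)] else []) ++ pvGo bs be p.2 rest

def pvFlat (bs be : Int) : List (Int × Int) → List Int
  | [] => []
  | p :: rest =>
      if p.1 ≥ be ∨ p.2 ≤ bs then pvFlat bs be rest
      else p.1 :: p.2 :: pvFlat bs be rest

theorem pvA_go (bs be : Int) (L : List (Int × Int)) : ∀ (exons : List (Int × Int)) (c : Int),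
    (let st := L.foldl
      (fun (st : List (Int × Int) × Int) p =>
        if p.1 ≥ be ∨ p.2 ≤ bs then st
        else ((if st.2 < p.1 then st.1 ++ [(st.2, p.1)] else st.1), p.2))
      (exons, c)
     if st.2 < be then st.1 ++ [(st.2, be)] else st.1)
    = exons ++ pvGo bs be c L := by
  induction L with
  | nil =>
      intro exons c
      simp only [List.foldl, pvGo]
      split_ifs <;> simp
  | cons p rest ih =>
      intro exons c
      simp only [List.foldl, pvGo]
      by_cases hg : p.1 ≥ be ∨ p.2 ≤ bs
      · simp [hg, ih]
      · by_cases hc : c < p.1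
        · simp [hg, hc, ih]
        · simp [hg, hc, ih]

theorem pvFoldl_flat (bs be : Int) (L : List (Int × Int)) : ∀ (acc : List Int),
    L.foldl
      (fun (acc : List Int) p =>
        if p.1 ≥ be ∨ p.2 ≤ bs then acc else acc ++ [p.1, p.2]) acc
    = acc ++ pvFlat bs be L := by
  induction L with
  | nil => intro acc; simp [pvFlat]
  | cons p rest ih =>
      intro acc
      simp only [List.foldl, pvFlat]
      by_cases hg : p.1 ≥ be ∨ p.2 ≤ bs
      · simp [hg, ih]
      · simp [hg, ih]

theorem pvPairs_go (bs be : Int) (L : List (Int × Int)) : ∀ (c : Int),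
    pvPairTwo (c :: pvFlat bs be L ++ [be]) = pvGo bs be c L := by
  induction L with
  | nil =>
      intro c
      show pvPairTwo [c, be] = _
      simp only [pvGo, pvPairTwo]
  | cons p rest ih =>
      intro c
      simp only [pvFlat, pvGo]
      by_cases hg : p.1 ≥ be ∨ p.2 ≤ bs
      · simp only [if_pos hg]; exact ih c
      · simp only [if_neg hg, List.cons_append, pvPairTwo]
        have h2 : pvPairTwo (p.2 :: (pvFlat bs be rest ++ [be])) = pvGo bs be p.2 rest := ih p.2
        by_cases hc : c < p.1
        · simp [hc, h2]
        · simp [hc, h2]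

-- ===== VERDICT (by name: the statement is the Claim_ definition above) =====
theorem derive_exons_from_introns_spec : Claim_equal_derive_exons_from_introns := by
  intro bs be L _
  show derive_exons_from_introns bs be L = derive_exons_from_introns_alt bs be L
  unfold derive_exons_from_introns derive_exons_from_introns_alt
  rw [pvA_go bs be L [] bs, pvFoldl_flat bs be L [bs]]
  simpa using (pvPairs_go bs be L bs).symm
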